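-- pv_equiv track=rewrite | github.com/cchristodoulaki/Pytheas | src/pytheas/header_events.py | get_num_repeating_values
-- ===== SOURCE A (Python) =====
-- def get_num_repeating_values(value_idxs):
--     seq_idxs = value_idxs[0:1]
--     for i in value_idxs[1:]:
--         if seq_idxs[-1]+1==i:
--             seq_idxs.append(i)
--         else:
--             break
--     return len(seq_idxs)
-- ===== SOURCE B (Python) =====
-- def get_num_repeating_values(value_idxs):
--     if not value_idxs:
--         return 0
--     v0 = value_idxs[0]
--     bad = [j for j, x in enumerate(value_idxs) if x != v0 + j]
--     return bad[0] if bad else len(value_idxs)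
-- ===== Notes on version B (the rewrite author's own statement) =====
-- stated objective: alternative
-- what changed: B is a two-stage search with no early break: it scans the whole list once building the list of all positions j where value_idxs[j] != value_idxs[0] + j, then returns the first such position (or the full length), instead of A's early-exit loop that grows a seq_idxs list by predecessor comparisons.
import Mathlib
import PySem

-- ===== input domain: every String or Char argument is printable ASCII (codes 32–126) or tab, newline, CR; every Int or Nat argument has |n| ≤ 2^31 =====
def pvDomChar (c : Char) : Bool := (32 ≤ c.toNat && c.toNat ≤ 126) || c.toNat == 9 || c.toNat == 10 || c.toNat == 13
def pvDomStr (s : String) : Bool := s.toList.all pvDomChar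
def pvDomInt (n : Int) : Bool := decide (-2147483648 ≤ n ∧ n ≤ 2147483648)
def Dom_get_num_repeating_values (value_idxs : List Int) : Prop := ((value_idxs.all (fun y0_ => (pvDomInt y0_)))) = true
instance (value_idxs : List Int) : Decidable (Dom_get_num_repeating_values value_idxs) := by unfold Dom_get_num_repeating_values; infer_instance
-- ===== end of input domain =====

-- B replaces A's early-exit predecessor loop by a two-stage search: collect all mismatch
-- positions against the anchor value_idxs[0] + j, then take the first (objective: alternative).

-- ===== PORT A =====
-- loop over value_idxs[1:], appending while seq_idxs[-1]+1 == i, breaking otherwise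
def pvALoop (seq : List Int) (rest : List Int) : List Int :=
  match rest with
  | [] => seq
  | i :: t =>
    -- seq_idxs[-1]: seq is nonempty whenever the loop body runs, so getD 0 is never taken
    if (PySem.List.pyGet? seq (-1)).getD 0 + 1 == i then pvALoop (seq ++ [i]) t
    else seq

def get_num_repeating_values (value_idxs : List Int) : Int :=
  (pvALoop (PySem.List.slice value_idxs (some 0) (some 1)) (PySem.List.slice value_idxs (some 1) none)).length

-- ===== PORT B =====
-- bad = [j for j, x in enumerate(value_idxs) if x != v0 + j]; return bad[0] if bad else len(value_idxs)
def get_num_repeating_values_alt (value_idxs : List Int) : Int :=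
  match value_idxs with
  | [] => 0
  | v0 :: _ =>
    match (PySem.List.enumerate value_idxs 0).filter (fun p => p.2 ≠ v0 + p.1) with
    | [] => (value_idxs.length : Int)
    | (j, _) :: _ => j

-- ===== PRECONDITION & SPEC =====
def Spec_get_num_repeating_values (value_idxs : List Int) (out : Int) : Prop := out = get_num_repeating_values_alt value_idxs
instance (value_idxs : List Int) (out : Int) : Decidable (Spec_get_num_repeating_values value_idxs out) := by unfold Spec_get_num_repeating_values; infer_instance

-- ===== CLAIM (what is proved, stated in full; the proofs are below) =====
def Claim_equal_get_num_repeating_values : Prop := ∀ (value_idxs : List Int), Dom_get_num_repeating_values value_idxs → Spec_get_num_repeating_values value_idxs (get_num_repeating_values value_idxs)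

-- ===== LEMMAS AND PROOFS =====

-- the common abstraction: length of the initial consecutive run of rest after anchor L
def pvRun (L : Int) (rest : List Int) : Int :=
  match rest with
  | [] => 0
  | x :: t => if x = L + 1 then 1 + pvRun x t else 0

lemma pvALoop_length (rest : List Int) : ∀ (s : List Int) (L : Int),
    ((pvALoop (s ++ [L]) rest).length : Int) = (s.length : Int) + 1 + pvRun L rest := by
  induction rest with
  | nil => intro s L; simp [pvALoop, pvRun]
  | cons x t ih =>
    intro s L
    simp only [pvALoop, PySem.List.pyGet?_neg_one_append_singleton, Option.getD_some, pvRun,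
      beq_iff_eq]
    by_cases h : L + 1 = x
    · have hx : x = L + 1 := h.symm
      rw [if_pos h, if_pos hx]
      have := ih (s ++ [L]) x
      simp only [List.append_assoc, List.singleton_append, List.length_append,
        List.length_singleton] at this ⊢
      push_cast at this ⊢
      omega
    · rw [if_neg h, if_neg (fun hx => h hx.symm)]
      simp

-- proof-side view of B's 'bad[0] if bad else default'
def pvFirstBad (d : Int) (l : List (Int × Int)) : Int :=
  match l with
  | [] => d
  | (k, _) :: _ => k

-- first mismatch position against the anchor expectation
lemma pvFilter_run (rest : List Int) : ∀ (v0 j : Int),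
    pvFirstBad (j + (rest.length : Int)) ((PySem.List.enumerate rest j).filter (fun p => p.2 ≠ v0 + p.1))
      = j + pvRun (v0 + j - 1) rest := by
  induction rest with
  | nil => intro v0 j; simp [PySem.List.enumerate_nil, pvRun, pvFirstBad]
  | cons x t ih =>
    intro v0 j
    rw [PySem.List.enumerate_cons]
    simp only [List.filter_cons, pvRun]
    by_cases h : x = v0 + j
    · rw [if_neg (by simp [h]), if_pos (by omega)]
      have hd : j + ((x :: t).length : Int) = (j + 1) + (t.length : Int) := by
        simp only [List.length_cons]; push_cast; omega
      rw [hd, ih v0 (j + 1), show v0 + (j + 1) - 1 = x from by omega]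
      ring
    · rw [if_pos (by simpa using h), if_neg (by omega)]
      simp [pvFirstBad]

-- ===== VERDICT (by name: the statement is the Claim_ definition above) =====
theorem get_num_repeating_values_spec : Claim_equal_get_num_repeating_values := by
  intro v _
  unfold Spec_get_num_repeating_values
  cases v with
  | nil => decide
  | cons v0 rest =>
    show ((pvALoop (PySem.List.slice (v0 :: rest) (some 0) (some 1))
        (PySem.List.slice (v0 :: rest) (some 1) none)).length : Int) = _
    have h1 : PySem.List.slice (v0 :: rest) (some 0) (some 1) = [v0] := by
      simp [PySem.List.slice_to]
    have h2 : PySem.List.slice (v0 :: rest) (some 1) none = rest := by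
      simp [PySem.List.slice_from]
    rw [h1, h2]
    have hA := pvALoop_length rest [] v0
    simp only [List.nil_append] at hA
    rw [hA]
    show _ = get_num_repeating_values_alt (v0 :: rest)
    unfold get_num_repeating_values_alt
    rw [PySem.List.enumerate_cons]
    simp only [List.filter_cons]
    rw [if_neg (by simp)]
    have hFR := pvFilter_run rest v0 1
    rw [show v0 + 1 - 1 = v0 from by omega] at hFR
    rw [show (0 : Int) + 1 = 1 from by norm_num]
    cases hf : List.filter (fun p => decide (p.2 ≠ v0 + p.1)) (PySem.List.enumerate rest 1) with
    | nil =>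
      rw [hf] at hFR
      have h0 : 1 + (rest.length : Int) = 1 + pvRun v0 rest := hFR
      simp only [List.length_nil, Nat.cast_zero, List.length_cons]
      push_cast
      omega
    | cons hd tl =>
      obtain ⟨k, x⟩ := hd
      rw [hf] at hFR
      have hk : k = 1 + pvRun v0 rest := hFR
      simp only [List.length_nil, Nat.cast_zero]
      omega
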